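-- pv_equiv track=rewrite | github.com/SophieXueZhang/medicare-claims-auditor | agents/policy_checker.py | _determine_benefit_category
-- ===== SOURCE A (Python) =====
-- def _determine_benefit_category(treatment):
--     """Determine benefit category"""
--     treatment_lower = treatment.lower()
--
--     # Determine benefit category based on treatment type
--     if any(keyword in treatment_lower for keyword in ["surgery", "surgical"]):
--         return "Inpatient Hospital Services"
--     elif any(keyword in treatment_lower for keyword in ["therapy", "rehabilitation", "treatment"]):
--         return "Outpatient Physical Therapy Services"
--     elif any(keyword in treatment_lower for keyword in ["imaging", "x-ray", "ct", "mri"]):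
--         return "Diagnostic X-Ray Tests"
--     elif any(keyword in treatment_lower for keyword in ["drug", "medication", "injection"]):
--         return "Drugs and Biologicals"
--     elif any(keyword in treatment_lower for keyword in ["device", "equipment"]):
--         return "Durable Medical Equipment"
--     else:
--         return "Physicians' Services"
-- ===== SOURCE B (Python) =====
-- KEYWORD_PRIORITIES = [
--     ("surgery", 0), ("surgical", 0),
--     ("therapy", 1), ("rehabilitation", 1), ("treatment", 1),
--     ("imaging", 2), ("x-ray", 2), ("ct", 2), ("mri", 2),
--     ("drug", 3), ("medication", 3), ("injection", 3),
--     ("device", 4), ("equipment", 4),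
-- ]
--
-- CATEGORIES = [
--     "Inpatient Hospital Services",
--     "Outpatient Physical Therapy Services",
--     "Diagnostic X-Ray Tests",
--     "Drugs and Biologicals",
--     "Durable Medical Equipment",
--     "Physicians' Services",
-- ]
--
--
-- def _determine_benefit_category(treatment):
--     """Single left-to-right scan of the text: at each position, note any keyword
--     starting there and keep the minimum priority seen; the scan order is
--     irrelevant because the smallest priority wins."""
--     t = treatment.lower()
--     best = 5
--     for i in range(len(t)):
--         for kw, p in KEYWORD_PRIORITIES:
--             if p < best and t.startswith(kw, i):
--                 best = p
--     return CATEGORIES[best]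
-- ===== Notes on version B (the rewrite author's own statement) =====
-- stated objective: alternative
-- what changed: Instead of A's five group-ordered substring searches, B makes one left-to-right scan over the lowered text, checking at each position which keyword starts there and keeping the minimum priority in an accumulator; the category is looked up from that priority at the end (correct because the smallest-priority matched group is exactly the first elif that fires).
import Mathlib
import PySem

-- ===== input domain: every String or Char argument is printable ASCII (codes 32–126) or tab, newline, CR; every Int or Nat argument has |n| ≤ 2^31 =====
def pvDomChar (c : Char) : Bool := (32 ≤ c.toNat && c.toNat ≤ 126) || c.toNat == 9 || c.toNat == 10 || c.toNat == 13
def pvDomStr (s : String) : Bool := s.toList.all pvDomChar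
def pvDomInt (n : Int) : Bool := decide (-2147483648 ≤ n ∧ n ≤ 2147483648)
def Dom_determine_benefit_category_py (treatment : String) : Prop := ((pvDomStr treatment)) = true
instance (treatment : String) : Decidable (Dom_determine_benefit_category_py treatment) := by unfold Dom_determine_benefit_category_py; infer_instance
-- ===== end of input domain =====

-- B replaces A's five priority-ordered substring searches by ONE left-to-right scan of the
-- lowered text keeping the minimum priority of any keyword starting at each position
-- (objective: alternative).

-- ===== PORT A =====
def determine_benefit_category_py (treatment : String) : String :=
  let treatment_lower := PySem.Str.lower treatment
  if (["surgery", "surgical"] : List String).any (fun keyword => PySem.Str.isIn keyword treatment_lower) then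
    "Inpatient Hospital Services"
  else if (["therapy", "rehabilitation", "treatment"] : List String).any (fun keyword => PySem.Str.isIn keyword treatment_lower) then
    "Outpatient Physical Therapy Services"
  else if (["imaging", "x-ray", "ct", "mri"] : List String).any (fun keyword => PySem.Str.isIn keyword treatment_lower) then
    "Diagnostic X-Ray Tests"
  else if (["drug", "medication", "injection"] : List String).any (fun keyword => PySem.Str.isIn keyword treatment_lower) then
    "Drugs and Biologicals"
  else if (["device", "equipment"] : List String).any (fun keyword => PySem.Str.isIn keyword treatment_lower) then
    "Durable Medical Equipment"
  else
    "Physicians' Services"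

-- ===== PORT B =====
-- the flat (keyword, priority) table KEYWORD_PRIORITIES of Source B (strings as char lists)
def pvKw : List (List Char × Nat) :=
  [("surgery".toList, 0), ("surgical".toList, 0),
   ("therapy".toList, 1), ("rehabilitation".toList, 1), ("treatment".toList, 1),
   ("imaging".toList, 2), ("x-ray".toList, 2), ("ct".toList, 2), ("mri".toList, 2),
   ("drug".toList, 3), ("medication".toList, 3), ("injection".toList, 3),
   ("device".toList, 4), ("equipment".toList, 4)]

-- CATEGORIES of Source B
def pvCats : List String :=
  ["Inpatient Hospital Services",
   "Outpatient Physical Therapy Services",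
   "Diagnostic X-Ray Tests",
   "Drugs and Biologicals",
   "Durable Medical Equipment",
   "Physicians' Services"]

-- the double loop of Source B: for i in range(len(t)): for kw, p in KEYWORD_PRIORITIES: …
-- Python's t.startswith(kw, i) is ported as startswith on the drop-i suffix, exact for 0 ≤ i ≤ len(t)
def pvBest (t : List Char) : Nat :=
  (List.range t.length).foldl
    (fun best i =>
      pvKw.foldl
        (fun best kp =>
          if kp.2 < best ∧ PySem.Chars.startswith (t.drop i) kp.1 = true then kp.2 else best)
        best)
    5

def determine_benefit_category_py_alt (treatment : String) : String :=
  let t := (PySem.Str.lower treatment).toList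
  -- CATEGORIES[best]: best starts at 5 and only decreases, so it is always < 6 and
  -- in range for the 6-element list; getD's default is unreachable
  pvCats.getD (pvBest t) ""

-- ===== PRECONDITION & SPEC =====
def Spec_determine_benefit_category_py (treatment : String) (out : String) : Prop := out = determine_benefit_category_py_alt treatment
instance (treatment : String) (out : String) : Decidable (Spec_determine_benefit_category_py treatment out) := by unfold Spec_determine_benefit_category_py; infer_instance

-- ===== CLAIM (what is proved, stated in full; the proofs are below) =====
def Claim_equal_determine_benefit_category_py : Prop := ∀ (treatment : String), Dom_determine_benefit_category_py treatment → Spec_determine_benefit_category_py treatment (determine_benefit_category_py treatment)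

-- ===== LEMMAS AND PROOFS =====

-- generic: a foldl whose one-step '≤ p' behaviour is 'b ≤ p ∨ Q x p' has '≤ p' iff the
-- initial value does or some element satisfies Q
theorem pv_foldl_le_iff {α : Type} (g : Nat → α → Nat) (Q : α → Nat → Prop)
    (h : ∀ b x p, g b x ≤ p ↔ b ≤ p ∨ Q x p) :
    ∀ (l : List α) (b p : Nat), l.foldl g b ≤ p ↔ b ≤ p ∨ ∃ x ∈ l, Q x p := by
  intro l
  induction l with
  | nil => simp
  | cons x xs ih =>
    intro b p
    rw [List.foldl_cons, ih, h]
    simp only [List.mem_cons]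
    constructor
    · rintro ((hb | hq) | ⟨y, hy, hQ⟩)
      · exact Or.inl hb
      · exact Or.inr ⟨x, Or.inl rfl, hq⟩
      · exact Or.inr ⟨y, Or.inr hy, hQ⟩
    · rintro (hb | ⟨y, (rfl | hy), hQ⟩)
      · exact Or.inl (Or.inl hb)
      · exact Or.inl (Or.inr hQ)
      · exact Or.inr ⟨y, hy, hQ⟩

theorem pv_step_le_iff (t : List Char) (i : Nat) (b : Nat) (kp : List Char × Nat) (p : Nat) :
    (if kp.2 < b ∧ PySem.Chars.startswith (t.drop i) kp.1 = true then kp.2 else b) ≤ p ↔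
      b ≤ p ∨ (PySem.Chars.startswith (t.drop i) kp.1 = true ∧ kp.2 ≤ p) := by
  split_ifs with h
  · constructor
    · intro hle; exact Or.inr ⟨h.2, hle⟩
    · rintro (hb | ⟨_, hle⟩)
      · omega
      · exact hle
  · rw [not_and_or] at h
    constructor
    · intro hb; exact Or.inl hb
    · rintro (hb | ⟨hs, hle⟩)
      · exact hb
      · rcases h with h | h
        · omega
        · exact absurd hs h

theorem pv_best_le_iff (t : List Char) (p : Nat) :
    pvBest t ≤ p ↔ 5 ≤ p ∨ ∃ i ∈ List.range t.length, ∃ kp ∈ pvKw,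
      PySem.Chars.startswith (t.drop i) kp.1 = true ∧ kp.2 ≤ p := by
  unfold pvBest
  exact pv_foldl_le_iff _ _
    (fun b i p => pv_foldl_le_iff _ _ (fun b kp p => pv_step_le_iff t i b kp p) pvKw b p)
    (List.range t.length) 5 p

-- bounded-position occurrence = substring membership, for a nonempty keyword
theorem pv_occ_iff (t kw : List Char) (hkw : kw ≠ []) :
    (∃ i ∈ List.range t.length, PySem.Chars.startswith (t.drop i) kw = true) ↔
      PySem.Chars.isIn kw t = true := by
  rw [← PySem.Chars.exists_prefix_drop_iff_isIn]
  constructor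
  · rintro ⟨i, _, hs⟩
    exact ⟨i, (PySem.Chars.startswith_iff _ _).1 hs⟩
  · rintro ⟨j, hj⟩
    by_cases hlt : j < t.length
    · exact ⟨j, List.mem_range.2 hlt, (PySem.Chars.startswith_iff _ _).2 hj⟩
    · exfalso
      rw [List.drop_eq_nil_of_le (by omega)] at hj
      exact hkw (List.prefix_nil.1 hj)

theorem pv_best_le_iff' (t : List Char) (p : Nat) (hp : p < 5) :
    pvBest t ≤ p ↔ ∃ kp ∈ pvKw, PySem.Chars.isIn kp.1 t = true ∧ kp.2 ≤ p := by
  rw [pv_best_le_iff]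
  have hne : ∀ kp ∈ pvKw, kp.1 ≠ [] := by decide
  constructor
  · rintro (h5 | ⟨i, hi, kp, hkp, hs, hle⟩)
    · omega
    · exact ⟨kp, hkp, (pv_occ_iff t kp.1 (hne kp hkp)).1 ⟨i, hi, hs⟩, hle⟩
  · rintro ⟨kp, hkp, hin, hle⟩
    rcases (pv_occ_iff t kp.1 (hne kp hkp)).2 hin with ⟨i, hi, hs⟩
    exact Or.inr ⟨i, hi, kp, hkp, hs, hle⟩

theorem pv_best_le_five (t : List Char) : pvBest t ≤ 5 := by
  rw [pv_best_le_iff]; exact Or.inl le_rfl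

-- keyword tables per priority threshold, established once by decide
theorem pv_key0 : ∀ kp ∈ pvKw, kp.2 ≤ 0 → kp.1 = "surgery".toList ∨ kp.1 = "surgical".toList := by decide

theorem pv_key1 : ∀ kp ∈ pvKw, kp.2 ≤ 1 → kp.1 = "surgery".toList ∨ kp.1 = "surgical".toList ∨ kp.1 = "therapy".toList ∨ kp.1 = "rehabilitation".toList ∨ kp.1 = "treatment".toList := by decide

theorem pv_key2 : ∀ kp ∈ pvKw, kp.2 ≤ 2 → kp.1 = "surgery".toList ∨ kp.1 = "surgical".toList ∨ kp.1 = "therapy".toList ∨ kp.1 = "rehabilitation".toList ∨ kp.1 = "treatment".toList ∨ kp.1 = "imaging".toList ∨ kp.1 = "x-ray".toList ∨ kp.1 = "ct".toList ∨ kp.1 = "mri".toList := by decide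

theorem pv_key3 : ∀ kp ∈ pvKw, kp.2 ≤ 3 → kp.1 = "surgery".toList ∨ kp.1 = "surgical".toList ∨ kp.1 = "therapy".toList ∨ kp.1 = "rehabilitation".toList ∨ kp.1 = "treatment".toList ∨ kp.1 = "imaging".toList ∨ kp.1 = "x-ray".toList ∨ kp.1 = "ct".toList ∨ kp.1 = "mri".toList ∨ kp.1 = "drug".toList ∨ kp.1 = "medication".toList ∨ kp.1 = "injection".toList := by decide

theorem pv_key4 : ∀ kp ∈ pvKw, kp.2 ≤ 4 → kp.1 = "surgery".toList ∨ kp.1 = "surgical".toList ∨ kp.1 = "therapy".toList ∨ kp.1 = "rehabilitation".toList ∨ kp.1 = "treatment".toList ∨ kp.1 = "imaging".toList ∨ kp.1 = "x-ray".toList ∨ kp.1 = "ct".toList ∨ kp.1 = "mri".toList ∨ kp.1 = "drug".toList ∨ kp.1 = "medication".toList ∨ kp.1 = "injection".toList ∨ kp.1 = "device".toList ∨ kp.1 = "equipment".toList := by decide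

-- ===== VERDICT (by name: the statement is the Claim_ definition above) =====
theorem determine_benefit_category_py_spec : Claim_equal_determine_benefit_category_py := by
  intro treatment _
  unfold Spec_determine_benefit_category_py determine_benefit_category_py determine_benefit_category_py_alt
  set t := (PySem.Str.lower treatment).toList with ht
  have hiff := fun p hp => pv_best_le_iff' t p hp
  simp only [List.any_cons, List.any_nil, Bool.or_eq_true, Bool.or_false,
    PySem.Str.isIn_eq, ← ht]
  have hmem : ∀ kp : List Char × Nat, kp ∈ pvKw ↔
      kp ∈ ([("surgery".toList, 0), ("surgical".toList, 0),
        ("therapy".toList, 1), ("rehabilitation".toList, 1), ("treatment".toList, 1),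
        ("imaging".toList, 2), ("x-ray".toList, 2), ("ct".toList, 2), ("mri".toList, 2),
        ("drug".toList, 3), ("medication".toList, 3), ("injection".toList, 3),
        ("device".toList, 4), ("equipment".toList, 4)] : List (List Char × Nat)) := by
    intro kp; rw [pvKw]
  by_cases h0 : PySem.Chars.isIn "surgery".toList t = true ∨
      PySem.Chars.isIn "surgical".toList t = true
  case pos =>
    have hb : pvBest t ≤ 0 := by
      rw [hiff 0 (by omega)]
      rcases h0 with h | h
      · exact ⟨("surgery".toList, 0), by rw [hmem]; simp only [List.mem_cons]; exact Or.inl trivial, h, le_rfl⟩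
      · exact ⟨("surgical".toList, 0), by rw [hmem]; simp only [List.mem_cons]; exact Or.inr (Or.inl trivial), h, le_rfl⟩
    have hv : pvBest t = 0 := by omega
    rw [if_pos h0, hv]; rfl
  case neg =>
    by_cases h1 : PySem.Chars.isIn "therapy".toList t = true ∨
        PySem.Chars.isIn "rehabilitation".toList t = true ∨
        PySem.Chars.isIn "treatment".toList t = true
    case pos =>
      have hb : pvBest t ≤ 1 := by
        rw [hiff 1 (by omega)]
        rcases h1 with h | h | h
        · exact ⟨("therapy".toList, 1), by rw [hmem]; simp only [List.mem_cons]; exact Or.inr (Or.inr (Or.inl trivial)), h, le_rfl⟩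
        · exact ⟨("rehabilitation".toList, 1), by rw [hmem]; simp only [List.mem_cons]; exact Or.inr (Or.inr (Or.inr (Or.inl trivial))), h, le_rfl⟩
        · exact ⟨("treatment".toList, 1), by rw [hmem]; simp only [List.mem_cons]; exact Or.inr (Or.inr (Or.inr (Or.inr (Or.inl trivial)))), h, le_rfl⟩
      have hnb : ¬ pvBest t ≤ 0 := by
        rw [hiff 0 (by omega)]
        rintro ⟨kp, hkp, hin, hle⟩
        rcases pv_key0 kp hkp hle with h | h <;> rw [h] at hin
        · exact h0 (Or.inl hin)
        · exact h0 (Or.inr hin)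
      have hv : pvBest t = 1 := by omega
      rw [if_neg h0, if_pos h1, hv]; rfl
    case neg =>
      by_cases h2 : PySem.Chars.isIn "imaging".toList t = true ∨
          PySem.Chars.isIn "x-ray".toList t = true ∨
          PySem.Chars.isIn "ct".toList t = true ∨
          PySem.Chars.isIn "mri".toList t = true
      case pos =>
        have hb : pvBest t ≤ 2 := by
          rw [hiff 2 (by omega)]
          rcases h2 with h | h | h | h
          · exact ⟨("imaging".toList, 2), by rw [hmem]; simp only [List.mem_cons]; exact Or.inr (Or.inr (Or.inr (Or.inr (Or.inr (Or.inl trivial))))), h, le_rfl⟩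
          · exact ⟨("x-ray".toList, 2), by rw [hmem]; simp only [List.mem_cons]; exact Or.inr (Or.inr (Or.inr (Or.inr (Or.inr (Or.inr (Or.inl trivial)))))), h, le_rfl⟩
          · exact ⟨("ct".toList, 2), by rw [hmem]; simp only [List.mem_cons]; exact Or.inr (Or.inr (Or.inr (Or.inr (Or.inr (Or.inr (Or.inr (Or.inl trivial))))))), h, le_rfl⟩
          · exact ⟨("mri".toList, 2), by rw [hmem]; simp only [List.mem_cons]; exact Or.inr (Or.inr (Or.inr (Or.inr (Or.inr (Or.inr (Or.inr (Or.inr (Or.inl trivial)))))))), h, le_rfl⟩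
        have hnb : ¬ pvBest t ≤ 1 := by
          rw [hiff 1 (by omega)]
          rintro ⟨kp, hkp, hin, hle⟩
          rcases pv_key1 kp hkp hle with h | h | h | h | h <;> rw [h] at hin
          · exact h0 (Or.inl hin)
          · exact h0 (Or.inr hin)
          · exact h1 (Or.inl hin)
          · exact h1 (Or.inr (Or.inl hin))
          · exact h1 (Or.inr (Or.inr hin))
        have hv : pvBest t = 2 := by omega
        rw [if_neg h0, if_neg h1, if_pos h2, hv]; rfl
      case neg =>
        by_cases h3 : PySem.Chars.isIn "drug".toList t = true ∨
            PySem.Chars.isIn "medication".toList t = true ∨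
            PySem.Chars.isIn "injection".toList t = true
        case pos =>
          have hb : pvBest t ≤ 3 := by
            rw [hiff 3 (by omega)]
            rcases h3 with h | h | h
            · exact ⟨("drug".toList, 3), by rw [hmem]; simp only [List.mem_cons]; exact Or.inr (Or.inr (Or.inr (Or.inr (Or.inr (Or.inr (Or.inr (Or.inr (Or.inr (Or.inl trivial))))))))), h, le_rfl⟩
            · exact ⟨("medication".toList, 3), by rw [hmem]; simp only [List.mem_cons]; exact Or.inr (Or.inr (Or.inr (Or.inr (Or.inr (Or.inr (Or.inr (Or.inr (Or.inr (Or.inr (Or.inl trivial)))))))))), h, le_rfl⟩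
            · exact ⟨("injection".toList, 3), by rw [hmem]; simp only [List.mem_cons]; exact Or.inr (Or.inr (Or.inr (Or.inr (Or.inr (Or.inr (Or.inr (Or.inr (Or.inr (Or.inr (Or.inr (Or.inl trivial))))))))))), h, le_rfl⟩
          have hnb : ¬ pvBest t ≤ 2 := by
            rw [hiff 2 (by omega)]
            rintro ⟨kp, hkp, hin, hle⟩
            rcases pv_key2 kp hkp hle with h | h | h | h | h | h | h | h | h <;> rw [h] at hin
            · exact h0 (Or.inl hin)
            · exact h0 (Or.inr hin)
            · exact h1 (Or.inl hin)
            · exact h1 (Or.inr (Or.inl hin))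
            · exact h1 (Or.inr (Or.inr hin))
            · exact h2 (Or.inl hin)
            · exact h2 (Or.inr (Or.inl hin))
            · exact h2 (Or.inr (Or.inr (Or.inl hin)))
            · exact h2 (Or.inr (Or.inr (Or.inr hin)))
          have hv : pvBest t = 3 := by omega
          rw [if_neg h0, if_neg h1, if_neg h2, if_pos h3, hv]; rfl
        case neg =>
          by_cases h4 : PySem.Chars.isIn "device".toList t = true ∨
              PySem.Chars.isIn "equipment".toList t = true
          case pos =>
            have hb : pvBest t ≤ 4 := by
              rw [hiff 4 (by omega)]
              rcases h4 with h | h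
              · exact ⟨("device".toList, 4), by rw [hmem]; simp only [List.mem_cons]; exact Or.inr (Or.inr (Or.inr (Or.inr (Or.inr (Or.inr (Or.inr (Or.inr (Or.inr (Or.inr (Or.inr (Or.inr (Or.inl trivial)))))))))))), h, le_rfl⟩
              · exact ⟨("equipment".toList, 4), by rw [hmem]; simp only [List.mem_cons]; exact Or.inr (Or.inr (Or.inr (Or.inr (Or.inr (Or.inr (Or.inr (Or.inr (Or.inr (Or.inr (Or.inr (Or.inr (Or.inr (Or.inl trivial))))))))))))), h, le_rfl⟩
            have hnb : ¬ pvBest t ≤ 3 := by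
              rw [hiff 3 (by omega)]
              rintro ⟨kp, hkp, hin, hle⟩
              rcases pv_key3 kp hkp hle with h | h | h | h | h | h | h | h | h | h | h | h <;> rw [h] at hin
              · exact h0 (Or.inl hin)
              · exact h0 (Or.inr hin)
              · exact h1 (Or.inl hin)
              · exact h1 (Or.inr (Or.inl hin))
              · exact h1 (Or.inr (Or.inr hin))
              · exact h2 (Or.inl hin)
              · exact h2 (Or.inr (Or.inl hin))
              · exact h2 (Or.inr (Or.inr (Or.inl hin)))
              · exact h2 (Or.inr (Or.inr (Or.inr hin)))
              · exact h3 (Or.inl hin)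
              · exact h3 (Or.inr (Or.inl hin))
              · exact h3 (Or.inr (Or.inr hin))
            have hv : pvBest t = 4 := by omega
            rw [if_neg h0, if_neg h1, if_neg h2, if_neg h3, if_pos h4, hv]; rfl
          case neg =>
            have hnb : ¬ pvBest t ≤ 4 := by
              rw [hiff 4 (by omega)]
              rintro ⟨kp, hkp, hin, hle⟩
              rcases pv_key4 kp hkp hle with h | h | h | h | h | h | h | h | h | h | h | h | h | h <;> rw [h] at hin
              · exact h0 (Or.inl hin)
              · exact h0 (Or.inr hin)
              · exact h1 (Or.inl hin)
              · exact h1 (Or.inr (Or.inl hin))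
              · exact h1 (Or.inr (Or.inr hin))
              · exact h2 (Or.inl hin)
              · exact h2 (Or.inr (Or.inl hin))
              · exact h2 (Or.inr (Or.inr (Or.inl hin)))
              · exact h2 (Or.inr (Or.inr (Or.inr hin)))
              · exact h3 (Or.inl hin)
              · exact h3 (Or.inr (Or.inl hin))
              · exact h3 (Or.inr (Or.inr hin))
              · exact h4 (Or.inl hin)
              · exact h4 (Or.inr hin)
            have hv : pvBest t = 5 := by have := pv_best_le_five t; omega
            rw [if_neg h0, if_neg h1, if_neg h2, if_neg h3, if_neg h4, hv]; rfl
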